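-- pv_equiv track=rewrite | github.com/Ananta-dot/PB_POC | rect_graph_z3.py | parse_adj
-- ===== SOURCE A (Python) =====
-- import argparse, json, math, sys, random
-- from typing import List, Tuple
--
-- def parse_adj(flat: str) -> List[List[int]]:
--     nums = [int(x) for x in flat.replace("\n", " ").split(",") if x.strip()]
--     n = int(math.isqrt(len(nums)))
--     if n * n != len(nums):
--         raise ValueError("Adjacency length is not a perfect square")
--     M = [nums[i*n:(i+1)*n] for i in range(n)]
--     # make symmetric, clear diag
--     for i in range(n):
--         M[i][i] = 0
--         for j in range(i+1, n):
--             v = 1 if (M[i][j] or M[j][i]) else 0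
--             M[i][j] = M[j][i] = v
--     return M
-- ===== SOURCE B (Python) =====
-- import math
-- from typing import List
--
-- def parse_adj(flat: str) -> List[List[int]]:
--     nums = [int(x) for x in flat.replace("\n", " ").split(",") if x.strip()]
--     n = int(math.isqrt(len(nums)))
--     if n * n != len(nums):
--         raise ValueError("Adjacency length is not a perfect square")
--     # stage 1: one linear scan over the flat list collects the undirected edge set
--     edges = set()
--     for k, v in enumerate(nums):
--         if v:
--             i, j = divmod(k, n)
--             if i != j:
--                 edges.add((min(i, j), max(i, j)))
--     # stage 2: emit the matrix by edge-set membership (the diagonal is never in the set)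
--     return [[1 if (min(i, j), max(i, j)) in edges else 0 for j in range(n)]
--             for i in range(n)]
-- ===== Notes on version B (the rewrite author's own statement) =====
-- stated objective: alternative
-- what changed: A reshapes the flat list into an intermediate matrix and symmetrizes it in place with upper-triangle mirror-writes; B instead makes one linear scan over the flat list collecting an undirected edge SET of (min,max) index pairs via divmod, then emits each matrix cell by a pure membership test in that set (the diagonal is never inserted).
import Mathlib
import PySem

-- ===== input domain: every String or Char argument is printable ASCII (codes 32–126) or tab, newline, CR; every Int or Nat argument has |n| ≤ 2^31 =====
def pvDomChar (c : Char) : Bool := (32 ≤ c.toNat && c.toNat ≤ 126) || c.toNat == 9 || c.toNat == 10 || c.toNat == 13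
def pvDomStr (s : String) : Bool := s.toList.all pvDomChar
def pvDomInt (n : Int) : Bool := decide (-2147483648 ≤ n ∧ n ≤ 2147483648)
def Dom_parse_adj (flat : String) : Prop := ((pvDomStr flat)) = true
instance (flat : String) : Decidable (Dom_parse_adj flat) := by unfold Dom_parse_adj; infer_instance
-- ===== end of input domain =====

-- B replaces A's reshape-then-symmetrize-in-place pass by a linear scan that collects an
-- undirected edge SET of (min,max) index pairs, then emits each cell by set membership.


-- shared parsing prefix, textually identical in both Pythons:
-- [int(x) for x in flat.replace("\n", " ").split(",") if x.strip()]
-- '.split(",")' has a nonempty separator, so Str.split? is always `some`; `getD []` is unreachable.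
-- int(x) raises on un-parseable tokens (excluded by Pre_); `getD 0` there is unreachable inside Pre_.
def pvToks (flat : String) : List String :=
  ((PySem.Str.split? (PySem.Str.replace flat "\n" " ") ",").getD []).filter
    (fun x => PySem.Str.strip x ≠ "")

def pvNums (flat : String) : List Int :=
  (pvToks flat).map (fun t => (PySem.Int.ofStr? t).getD 0)

-- ===== PORT A =====
-- M[i][j] read / write on a list-of-lists state (indices are in range whenever these run)
def pvGet2 (M : List (List Int)) (i j : Nat) : Int := (M.getD i []).getD j 0
def pvSet2 (M : List (List Int)) (i j : Nat) (v : Int) : List (List Int) :=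
  M.modify i (fun row => row.set j v)

-- body of the inner loop: v = 1 if (M[i][j] or M[j][i]) else 0; M[i][j] = M[j][i] = v
def pvInnerStep (i : Nat) (M : List (List Int)) (j : Nat) : List (List Int) :=
  let v : Int := if pvGet2 M i j ≠ 0 ∨ pvGet2 M j i ≠ 0 then 1 else 0
  pvSet2 (pvSet2 M i j v) j i v

-- body of the outer loop: M[i][i] = 0; for j in range(i+1, n): …
def pvOuterStep (n : Nat) (M : List (List Int)) (i : Nat) : List (List Int) :=
  (List.range' (i+1) (n - (i+1))).foldl (pvInnerStep i) (pvSet2 M i i 0)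

-- M = [nums[i*n:(i+1)*n] for i in range(n)]
def pvReshape (nums : List Int) (n : Nat) : List (List Int) :=
  (List.range n).map
    (fun i => PySem.List.slice nums (some ((i*n : Nat) : Int)) (some (((i+1)*n : Nat) : Int)))

def parse_adj (flat : String) : List (List Int) :=
  let nums := pvNums flat
  let n := Nat.sqrt nums.length          -- n = int(math.isqrt(len(nums)))
  if n * n = nums.length then
    (List.range n).foldl (pvOuterStep n) (pvReshape nums n)
  else []                                 -- Python raises ValueError here (outside Pre_)

-- ===== PORT B =====
-- stage 1 of Source B: for k, v in enumerate(nums): if v: i, j = divmod(k, n); if i != j: edges.add(...)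
-- (indices k, i, j are nonnegative Python ints; they are carried as Nat, same values)
def pvEdges (nums : List Int) (n : Nat) : PySem.Set (Nat × Nat) :=
  nums.zipIdx.foldl (fun s kv =>
    if kv.1 ≠ 0 then
      let i := kv.2 / n
      let j := kv.2 % n
      if i ≠ j then PySem.Set.add s (min i j, max i j) else s
    else s) PySem.Set.empty

def parse_adj_alt (flat : String) : List (List Int) :=
  let nums := pvNums flat
  let n := Nat.sqrt nums.length
  if n * n = nums.length then
    let edges := pvEdges nums n
    -- stage 2: [[1 if (min(i,j),max(i,j)) in edges else 0 for j in range(n)] for i in range(n)]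
    (List.range n).map (fun i => (List.range n).map (fun j =>
      if (min i j, max i j) ∈ edges then (1 : Int) else 0))
  else []                                 -- Python raises ValueError here (outside Pre_)

-- ===== PRECONDITION & SPEC =====
-- Pre_ excludes exactly the inputs where Python A raises: a token int() cannot parse (ValueError),
-- or the token count is not a perfect square (the explicit ValueError).
def Pre_parse_adj (flat : String) : Prop :=
  ((pvToks flat).all (fun t => (PySem.Int.ofStr? t).isSome)) = true ∧
  ∃ n, n ≤ (pvToks flat).length ∧ n * n = (pvToks flat).length
instance (flat : String) : Decidable (Pre_parse_adj flat) := by unfold Pre_parse_adj; infer_instance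

def pvWitness_parse_adj : String := "1,0,0,1"

def Spec_parse_adj (flat : String) (out : List (List Int)) : Prop := out = parse_adj_alt flat
instance (flat : String) (out : List (List Int)) : Decidable (Spec_parse_adj flat out) := by unfold Spec_parse_adj; infer_instance

-- ===== CLAIM (what is proved, stated in full; the proofs are below) =====
def Claim_equal_parse_adj : Prop := ∀ (flat : String), Dom_parse_adj flat → Pre_parse_adj flat → Spec_parse_adj flat (parse_adj flat)

-- ===== LEMMAS AND PROOFS =====

-- the intended value of cell (r,c), read straight off the flat list
def pvTgt (nums : List Int) (n r c : Nat) : Int :=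
  if r = c then 0
  else if nums.getD (r*n+c) 0 ≠ 0 ∨ nums.getD (c*n+r) 0 ≠ 0 then 1 else 0

-- the common middle form both ports are reduced to
def pvComp (nums : List Int) (n : Nat) : List (List Int) :=
  (List.range n).map (fun i => (List.range n).map (fun j => pvTgt nums n i j))

-- shape: n rows, each of length n
def pvSh (M : List (List Int)) (n : Nat) : Prop :=
  M.length = n ∧ ∀ (r : Nat) (h : r < M.length), M[r].length = n

theorem pvSh_set2 {M : List (List Int)} {n i j : Nat} (v : Int) (h : pvSh M n) :
    pvSh (pvSet2 M i j v) n := by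
  refine ⟨by simpa [pvSet2] using h.1, ?_⟩
  intro r hr
  have hr' : r < M.length := by simpa [pvSet2] using hr
  simp only [pvSet2, List.getElem_modify]
  split <;> simp [h.2 r hr']

theorem pvGet2_set2 {M : List (List Int)} {n : Nat} (h : pvSh M n) {i j : Nat}
    (hi : i < n) (hj : j < n) (v : Int) (r c : Nat) :
    pvGet2 (pvSet2 M i j v) r c = if r = i ∧ c = j then v else pvGet2 M r c := by
  unfold pvGet2 pvSet2
  rw [List.getD, List.getD, List.getElem?_modify]
  cases hMr : M[r]? with
  | none =>
    have hrge : M.length ≤ r := List.getElem?_eq_none_iff.mp hMr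
    have hri : r ≠ i := by have := h.1; omega
    simp [hri, List.getD, hMr]
  | some row =>
    obtain ⟨hrlt, hrow⟩ := List.getElem?_eq_some_iff.mp hMr
    have hrowlen : row.length = n := by rw [← hrow]; exact h.2 r hrlt
    simp only [Option.map_eq_map, Option.map_some, Option.getD_some, List.getD, hMr]
    by_cases hri : i = r
    · subst hri
      simp only [if_true, true_and]
      by_cases hcj : c = j
      · subst hcj
        rw [List.getElem?_set, if_pos rfl, if_pos (hrowlen ▸ hj)]
        simp
      · rw [List.getElem?_set, if_neg (Ne.symm hcj), if_neg (by simp [hcj])]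
    · rw [if_neg hri, if_neg (by intro hh; exact hri hh.1.symm)]

-- invariant for the inner loop (outer index i, inner index running from s):
-- cells strictly below row/col i are done, the diagonal cell (i,i) is done, in row/col i the
-- cells whose other index is < s are done; everything else still holds its original flat value.
def pvInv (nums : List Int) (n i s : Nat) (M : List (List Int)) : Prop :=
  ∀ r c, r < n → c < n →
    pvGet2 M r c =
      if min r c < i ∨ (r = c ∧ r = i) ∨ (min r c = i ∧ max r c < s) then pvTgt nums n r c
      else nums.getD (r*n+c) 0

-- invariant between outer iterations: rows/cols below k are done, the rest is original
def pvInvO (nums : List Int) (n k : Nat) (M : List (List Int)) : Prop :=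
  ∀ r c, r < n → c < n →
    pvGet2 M r c = if min r c < k then pvTgt nums n r c else nums.getD (r*n+c) 0

theorem pvTgt_symm (nums : List Int) (n r c : Nat) : pvTgt nums n r c = pvTgt nums n c r := by
  unfold pvTgt
  by_cases h : r = c
  · simp [h]
  · simp [h, Ne.symm h, or_comm]

theorem pv_inner_fold (nums : List Int) (n i : Nat) (hi : i < n) :
    ∀ (m s : Nat) (M : List (List Int)), s + m = n → i < s → pvSh M n → pvInv nums n i s M →
      pvSh ((List.range' s m).foldl (pvInnerStep i) M) n ∧
      pvInv nums n i n ((List.range' s m).foldl (pvInnerStep i) M) := by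
  intro m
  induction m with
  | zero =>
    intro s M hs his hSh hInv
    simp only [List.range', List.foldl_nil]
    exact ⟨hSh, (show s = n by omega) ▸ hInv⟩
  | succ m ih =>
    intro s M hs his hSh hInv
    have hsn : s < n := by omega
    rw [List.range'_succ, List.foldl_cons]
    set v : Int := if pvGet2 M i s ≠ 0 ∨ pvGet2 M s i ≠ 0 then 1 else 0 with hv
    have hstep : pvInnerStep i M s = pvSet2 (pvSet2 M i s v) s i v := rfl
    have hgis : pvGet2 M i s = nums.getD (i*n+s) 0 := by
      rw [hInv i s hi hsn, if_neg (by omega)]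
    have hgsi : pvGet2 M s i = nums.getD (s*n+i) 0 := by
      rw [hInv s i hsn hi, if_neg (by omega)]
    have hvt : v = pvTgt nums n i s := by
      rw [hv, hgis, hgsi]
      unfold pvTgt
      rw [if_neg (show ¬ i = s by omega)]
    have hSh1 : pvSh (pvSet2 M i s v) n := pvSh_set2 v hSh
    have hSh2 : pvSh (pvSet2 (pvSet2 M i s v) s i v) n := pvSh_set2 v hSh1
    refine ih (s+1) _ (by omega) (by omega) (hstep ▸ hSh2) ?_
    rw [hstep]
    intro r c hr hc
    rw [pvGet2_set2 hSh1 hsn hi v r c, pvGet2_set2 hSh hi hsn v r c]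
    by_cases h1 : r = s ∧ c = i
    · rw [if_pos h1, if_pos (by omega), hvt, h1.1, h1.2, pvTgt_symm]
    · rw [if_neg h1]
      by_cases h2 : r = i ∧ c = s
      · rw [if_pos h2, if_pos (by omega), hvt, h2.1, h2.2]
      · rw [if_neg h2, hInv r c hr hc]
        by_cases h3 : min r c < i ∨ (r = c ∧ r = i) ∨ (min r c = i ∧ max r c < s)
        · rw [if_pos h3, if_pos (by omega)]
        · rw [if_neg h3, if_neg (by omega)]

theorem pv_outer_fold (nums : List Int) (n : Nat) :
    ∀ (m k : Nat) (M : List (List Int)), k + m = n → pvSh M n → pvInvO nums n k M →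
      pvSh ((List.range' k m).foldl (pvOuterStep n) M) n ∧
      pvInvO nums n n ((List.range' k m).foldl (pvOuterStep n) M) := by
  intro m
  induction m with
  | zero =>
    intro k M hk hSh hInv
    simp only [List.range', List.foldl_nil]
    exact ⟨hSh, (show k = n by omega) ▸ hInv⟩
  | succ m ih =>
    intro k M hk hSh hInv
    have hkn : k < n := by omega
    rw [List.range'_succ, List.foldl_cons]
    have hSh1 : pvSh (pvSet2 M k k 0) n := pvSh_set2 0 hSh
    have hInv1 : pvInv nums n k (k+1) (pvSet2 M k k 0) := by
      intro r c hr hc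
      rw [pvGet2_set2 hSh hkn hkn 0 r c]
      by_cases h1 : r = k ∧ c = k
      · rw [if_pos h1, if_pos (by omega)]
        unfold pvTgt
        rw [if_pos (by omega)]
      · rw [if_neg h1, hInv r c hr hc]
        by_cases h2 : min r c < k
        · rw [if_pos h2, if_pos (by omega)]
        · rw [if_neg h2, if_neg (by omega)]
    have hmain := pv_inner_fold nums n k hkn (n - (k+1)) (k+1) (pvSet2 M k k 0)
      (by omega) (by omega) hSh1 hInv1
    have hstep : pvOuterStep n M k =
        (List.range' (k+1) (n-(k+1))).foldl (pvInnerStep k) (pvSet2 M k k 0) := rfl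
    rw [hstep]
    refine ih (k+1) _ (by omega) hmain.1 ?_
    intro r c hr hc
    rw [hmain.2 r c hr hc]
    by_cases h3 : min r c < k ∨ (r = c ∧ r = k) ∨ (min r c = k ∧ max r c < n)
    · rw [if_pos h3, if_pos (by omega)]
    · rw [if_neg h3, if_neg (by omega)]

-- the initial reshaped matrix: shape and cell values
theorem pv_M0 (nums : List Int) (n : Nat) (hlen : nums.length = n * n) :
    pvSh (pvReshape nums n) n ∧ pvInvO nums n 0 (pvReshape nums n) := by
  have hrow : ∀ i : Nat,
      PySem.List.slice nums (some ((i*n : Nat) : Int)) (some (((i+1)*n : Nat) : Int)) =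
        (nums.drop (i*n)).take n := by
    intro i
    rw [PySem.List.slice_natCast]
    congr 1
    have : (i+1)*n = i*n + n := by ring
    omega
  have hle : ∀ i : Nat, i < n → i*n + n ≤ n*n := by
    intro i hi
    have := Nat.mul_le_mul_right n (show i+1 ≤ n by omega)
    simpa [Nat.succ_mul] using this
  constructor
  · refine ⟨by simp [pvReshape], ?_⟩
    intro r hr
    have hr' : r < n := by simpa [pvReshape] using hr
    simp only [pvReshape] at hr ⊢
    rw [List.getElem_map, List.getElem_range, hrow]
    have := hle r hr'
    simp [hlen]
    omega
  · intro r c hr hc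
    rw [if_neg (by omega)]
    have hrM : (pvReshape nums n)[r]? = some ((nums.drop (r*n)).take n) := by
      rw [pvReshape, List.getElem?_map, List.getElem?_range hr, Option.map_some, hrow r]
    simp only [pvGet2, List.getD, hrM, Option.getD_some]
    rw [List.getElem?_take_of_lt hc, List.getElem?_drop]

-- core equality for A: reshape+symmetrize = the middle comprehension
theorem pv_core (nums : List Int) (n : Nat) (hlen : nums.length = n * n) :
    (List.range n).foldl (pvOuterStep n) (pvReshape nums n) = pvComp nums n := by
  obtain ⟨hSh0, hInv0⟩ := pv_M0 nums n hlen
  have h := pv_outer_fold nums n n 0 _ (by omega) hSh0 hInv0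
  rw [← List.range_eq_range'] at h
  obtain ⟨hSh, hInv⟩ := h
  refine List.ext_getElem ?_ ?_
  · rw [hSh.1]; simp [pvComp]
  · intro r h1 h2
    have hr : r < n := hSh.1 ▸ h1
    have hrowlen := hSh.2 r h1
    refine List.ext_getElem ?_ ?_
    · rw [hrowlen]; simp [pvComp]
    · intro c hc1 hc2
      have hc : c < n := hrowlen ▸ hc1
      have hval := hInv r c hr hc
      rw [if_pos (by omega)] at hval
      have hget : pvGet2 ((List.range n).foldl (pvOuterStep n) (pvReshape nums n)) r c
          = ((List.range n).foldl (pvOuterStep n) (pvReshape nums n))[r][c] := by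
        simp only [pvGet2, List.getD, List.getElem?_eq_getElem h1,
          List.getElem?_eq_getElem hc1, Option.getD_some]
      rw [← hget, hval]
      simp [pvComp, List.getElem_map, List.getElem_range]

-- B side: membership in the edge set, characterized over the flat list
theorem pv_mem_edges (nums : List Int) (n : Nat) (p : Nat × Nat) :
    p ∈ pvEdges nums n ↔
      ∃ k, ∃ h : k < nums.length, nums[k] ≠ 0 ∧ k / n ≠ k % n ∧
        p = (min (k / n) (k % n), max (k / n) (k % n)) := by
  have gen : ∀ (l : List Int) (start : Nat) (s : PySem.Set (Nat × Nat)),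
      p ∈ (l.zipIdx start).foldl (fun s kv =>
        if kv.1 ≠ 0 then
          if kv.2 / n ≠ kv.2 % n then PySem.Set.add s (min (kv.2 / n) (kv.2 % n), max (kv.2 / n) (kv.2 % n)) else s
        else s) s ↔
      p ∈ s ∨ ∃ k, ∃ h : k < l.length, l[k] ≠ 0 ∧ (start + k) / n ≠ (start + k) % n ∧
        p = (min ((start + k) / n) ((start + k) % n), max ((start + k) / n) ((start + k) % n)) := by
    intro l
    induction l with
    | nil => intro start s; simp
    | cons x xs ih =>
      intro start s
      rw [List.zipIdx_cons, List.foldl_cons, ih (start + 1)]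
      have hstep : (p ∈ (if x ≠ 0 then
            if start / n ≠ start % n then PySem.Set.add s (min (start / n) (start % n), max (start / n) (start % n)) else s
          else s)) ↔
          p ∈ s ∨ (x ≠ 0 ∧ start / n ≠ start % n ∧
            p = (min (start / n) (start % n), max (start / n) (start % n))) := by
        split_ifs with h1 h2
        · rw [PySem.Set.mem_add]; tauto
        · tauto
        · tauto
      rw [hstep]
      constructor
      · rintro ((hs | hx) | ⟨k, hk, h0, hne, hp⟩)
        · exact Or.inl hs
        · exact Or.inr ⟨0, by simp, by simpa using hx.1, by simpa using hx.2.1, by simpa using hx.2.2⟩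
        · refine Or.inr ⟨k + 1, by simpa using hk, by simpa using h0, ?_, ?_⟩
          · have : start + 1 + k = start + (k + 1) := by omega
            rw [← this]; exact hne
          · have : start + 1 + k = start + (k + 1) := by omega
            rw [← this]; exact hp
      · rintro (hs | ⟨k, hk, h0, hne, hp⟩)
        · exact Or.inl (Or.inl hs)
        · cases k with
          | zero => exact Or.inl (Or.inr ⟨by simpa using h0, by simpa using hne, by simpa using hp⟩)
          | succ k =>
            have hk' : k < xs.length := by simp only [List.length_cons] at hk; omega
            refine Or.inr ⟨k, hk', by simpa using h0, ?_, ?_⟩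
            · have : start + 1 + k = start + (k + 1) := by omega
              rw [this]; exact hne
            · have : start + 1 + k = start + (k + 1) := by omega
              rw [this]; exact hp
  have := gen nums 0 PySem.Set.empty
  simp only [Nat.zero_add] at this
  rw [pvEdges]
  constructor
  · intro h
    rcases (this.mp h) with h' | h'
    · simp [PySem.Set.empty] at h'
    · exact h'
  · intro h; exact this.mpr (Or.inr h)

theorem pv_divmod_of_lt (n i j : Nat) (hi : i < n) (hj : j < n) :
    (i * n + j) / n = i ∧ (i * n + j) % n = j := by
  have h0 : 0 < n := by omega
  constructor
  · rw [Nat.mul_comm i n, Nat.mul_add_div h0, Nat.div_eq_of_lt hj]; omega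
  · rw [Nat.mul_comm i n, Nat.mul_add_mod, Nat.mod_eq_of_lt hj]

theorem pv_mem_edges_iff (nums : List Int) (n : Nat) (hlen : nums.length = n * n)
    (i j : Nat) (hi : i < n) (hj : j < n) (hij : i ≠ j) :
    (min i j, max i j) ∈ pvEdges nums n ↔
      nums.getD (i*n+j) 0 ≠ 0 ∨ nums.getD (j*n+i) 0 ≠ 0 := by
  rw [pv_mem_edges]
  constructor
  · rintro ⟨k, hk, h0, hne, hp⟩
    have hkab : (k / n) * n + k % n = k := by
      rw [Nat.mul_comm]; exact Nat.div_add_mod k n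
    have hbn : k % n < n := Nat.mod_lt _ (by omega)
    have hkn : k < n * n := hlen ▸ hk
    have han : k / n < n := by
      by_contra hc
      have h1 : n * n ≤ (k / n) * n := Nat.mul_le_mul_right n (by omega)
      omega
    have hpair : (k / n = i ∧ k % n = j) ∨ (k / n = j ∧ k % n = i) := by
      have h1 := congrArg Prod.fst hp
      have h2 := congrArg Prod.snd hp
      simp only at h1 h2
      omega
    rcases hpair with ⟨h1, h2⟩ | ⟨h1, h2⟩
    · left
      rw [h1, h2] at hkab
      rw [List.getD, List.getElem?_eq_getElem (by omega : i*n+j < nums.length)]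
      have hkk : i*n+j = k := hkab
      simpa [hkk] using h0
    · right
      rw [h1, h2] at hkab
      rw [List.getD, List.getElem?_eq_getElem (by omega : j*n+i < nums.length)]
      have hkk : j*n+i = k := hkab
      simpa [hkk] using h0
  · intro h
    rcases h with h | h
    · have hk : i*n+j < nums.length := by
        have : i*n+j < n*n := by nlinarith
        omega
      obtain ⟨hd, hm⟩ := pv_divmod_of_lt n i j hi hj
      refine ⟨i*n+j, hk, ?_, by rw [hd, hm]; exact hij, by rw [hd, hm]⟩
      rwa [List.getD, List.getElem?_eq_getElem hk, Option.getD_some] at h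
    · have hk : j*n+i < nums.length := by
        have : j*n+i < n*n := by nlinarith
        omega
      obtain ⟨hd, hm⟩ := pv_divmod_of_lt n j i hj hi
      refine ⟨j*n+i, hk, ?_, by rw [hd, hm]; exact (Ne.symm hij), ?_⟩
      · rwa [List.getD, List.getElem?_eq_getElem hk, Option.getD_some] at h
      · rw [hd, hm]
        have h1 : min j i = min i j := by omega
        have h2 : max j i = max i j := by omega
        rw [h1, h2]

theorem pv_diag_not_mem (nums : List Int) (n i : Nat) :
    (min i i, max i i) ∉ pvEdges nums n := by
  intro h
  rw [pv_mem_edges] at h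
  obtain ⟨k, hk, h0, hne, hp⟩ := h
  have h1 := congrArg Prod.fst hp
  have h2 := congrArg Prod.snd hp
  simp only at h1 h2
  omega

-- core equality for B: edge-set emission = the middle comprehension
theorem pv_core_alt (nums : List Int) (n : Nat) (hlen : nums.length = n * n) :
    ((List.range n).map (fun i => (List.range n).map (fun j =>
      if (min i j, max i j) ∈ pvEdges nums n then (1 : Int) else 0))) = pvComp nums n := by
  unfold pvComp
  refine List.map_congr_left ?_
  intro i hi
  have hi' : i < n := List.mem_range.mp hi
  refine List.map_congr_left ?_
  intro j hj
  have hj' : j < n := List.mem_range.mp hj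
  by_cases hij : i = j
  · subst hij
    rw [if_neg (pv_diag_not_mem nums n i), pvTgt, if_pos rfl]
  · rw [pvTgt, if_neg hij]
    by_cases hm : nums.getD (i*n+j) 0 ≠ 0 ∨ nums.getD (j*n+i) 0 ≠ 0
    · rw [if_pos ((pv_mem_edges_iff nums n hlen i j hi' hj' hij).mpr hm), if_pos hm]
    · rw [if_neg (fun hmem => hm ((pv_mem_edges_iff nums n hlen i j hi' hj' hij).mp hmem)),
        if_neg hm]

-- ===== VERDICT (by name: the statement is the Claim_ definition above) =====
theorem parse_adj_spec : Claim_equal_parse_adj := by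
  intro flat _ hPre
  unfold Spec_parse_adj parse_adj parse_adj_alt
  have hlen : (pvNums flat).length = (pvToks flat).length := by simp [pvNums]
  obtain ⟨m, -, hm⟩ := hPre.2
  have hsq : Nat.sqrt (pvNums flat).length * Nat.sqrt (pvNums flat).length
      = (pvNums flat).length := by
    rw [hlen, ← hm, Nat.sqrt_eq m]
  simp only [hsq]
  rw [pv_core (pvNums flat) _ hsq.symm, pv_core_alt (pvNums flat) _ hsq.symm]
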